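-- pv_equiv track=rewrite | github.com/shaug/atelier | src/atelier/skill_frontmatter_validation.py | _normalize_block_lines
-- ===== SOURCE A (Python) =====
-- def _normalize_block_lines(block_lines: list[str], style: str) -> str:
--     if style.startswith(">"):
--         paragraphs: list[str] = []
--         current: list[str] = []
--         for line in block_lines:
--             stripped = line.strip()
--             if not stripped:
--                 if current:
--                     paragraphs.append(" ".join(current))
--                     current = []
--                 continue
--             current.append(stripped)
--         if current:
--             paragraphs.append(" ".join(current))
--         return "\n".join(paragraphs).strip()
--     return "\n".join(block_lines).strip()
-- ===== SOURCE B (Python) =====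
-- def _normalize_block_lines(block_lines: list[str], style: str) -> str:
--     if style.startswith(">"):
--         paragraphs: list[str] = []
--         rest = block_lines
--         while rest:
--             head, rest = rest[0], rest[1:]
--             if not head.strip():
--                 continue
--             run = [head.strip()]
--             while rest and rest[0].strip():
--                 run.append(rest[0].strip())
--                 rest = rest[1:]
--             paragraphs.append(" ".join(run))
--         return "\n".join(paragraphs).strip()
--     return "\n".join(block_lines).strip()
-- ===== Notes on version B (the rewrite author's own statement) =====
-- stated objective: alternative
-- what changed: The folded ('>') branch no longer flushes a cross-iteration buffer on blank lines; B segments the lines into maximal runs of non-blank lines with an inner span loop over the remaining list and joins each run directly into a paragraph.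
import Mathlib
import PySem

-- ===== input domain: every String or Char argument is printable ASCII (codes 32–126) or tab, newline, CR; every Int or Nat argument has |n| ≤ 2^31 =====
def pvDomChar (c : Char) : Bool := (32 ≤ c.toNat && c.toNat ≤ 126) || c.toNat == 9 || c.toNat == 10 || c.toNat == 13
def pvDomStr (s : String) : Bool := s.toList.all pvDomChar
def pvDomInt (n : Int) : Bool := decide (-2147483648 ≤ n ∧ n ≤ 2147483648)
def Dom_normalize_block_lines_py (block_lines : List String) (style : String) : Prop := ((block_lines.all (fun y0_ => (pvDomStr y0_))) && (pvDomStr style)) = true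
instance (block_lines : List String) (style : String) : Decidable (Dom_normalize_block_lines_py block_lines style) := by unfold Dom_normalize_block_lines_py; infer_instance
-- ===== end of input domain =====

-- B differs from A only in decomposition: A flushes a `current` buffer whenever it meets a
-- blank line; B consumes each maximal run of non-blank lines with an inner loop. Return values agree.

-- ===== PORT A =====
-- the for-loop of A: state = (paragraphs, current); at the end the pending `current` is flushed
def normAloop : List String → List String → List String → List String
  | [], paragraphs, current =>
      if current = [] then paragraphs else paragraphs ++ [PySem.Str.join " " current]
  | line :: rest, paragraphs, current =>
      let stripped := PySem.Str.strip line
      if stripped = "" then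
        if current = [] then normAloop rest paragraphs current
        else normAloop rest (paragraphs ++ [PySem.Str.join " " current]) []
      else normAloop rest paragraphs (current ++ [stripped])

def normalize_block_lines_py (block_lines : List String) (style : String) : String :=
  if PySem.Str.startswith style ">" then
    PySem.Str.strip (PySem.Str.join "\n" (normAloop block_lines [] []))
  else
    PySem.Str.strip (PySem.Str.join "\n" block_lines)

-- ===== PORT B =====
-- inner while loop of B: extend `run` while the next remaining line is non-blank
def pvRunB (run : List String) : List String → List String × List String
  | [] => (run, [])
  | y :: ys =>
      if PySem.Str.strip y = "" then (run, y :: ys)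
      else pvRunB (run ++ [PySem.Str.strip y]) ys

-- needed by pvOuterB's termination proof (cited in its decreasing_by)
lemma pvRunB_len (rest : List String) : ∀ (run : List String),
    (pvRunB run rest).2.length ≤ rest.length := by
  induction rest with
  | nil => intro run; simp [pvRunB]
  | cons y ys ih =>
      intro run
      simp only [pvRunB]
      split_ifs
      · simp
      · exact le_trans (ih _) (by simp)

-- outer while loop of B: state = (paragraphs, rest)
def pvOuterB (paragraphs : List String) : List String → List String
  | [] => paragraphs
  | head :: rest =>
      if PySem.Str.strip head = "" then pvOuterB paragraphs rest
      else
        let p := pvRunB [PySem.Str.strip head] rest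
        pvOuterB (paragraphs ++ [PySem.Str.join " " p.1]) p.2
termination_by rest => rest.length
decreasing_by
  · simp
  · have := pvRunB_len rest [PySem.Str.strip head]
    simp; omega

def normalize_block_lines_py_alt (block_lines : List String) (style : String) : String :=
  if PySem.Str.startswith style ">" then
    PySem.Str.strip (PySem.Str.join "\n" (pvOuterB [] block_lines))
  else
    PySem.Str.strip (PySem.Str.join "\n" block_lines)

-- ===== PRECONDITION & SPEC =====
def Spec_normalize_block_lines_py (block_lines : List String) (style : String) (out : String) : Prop := out = normalize_block_lines_py_alt block_lines style
instance (block_lines : List String) (style : String) (out : String) : Decidable (Spec_normalize_block_lines_py block_lines style out) := by unfold Spec_normalize_block_lines_py; infer_instance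

-- ===== CLAIM (what is proved, stated in full; the proofs are below) =====
def Claim_equal_normalize_block_lines_py : Prop := ∀ (block_lines : List String) (style : String), Dom_normalize_block_lines_py block_lines style → Spec_normalize_block_lines_py block_lines style (normalize_block_lines_py block_lines style)

-- ===== LEMMAS AND PROOFS =====

-- A's loop emits the already-collected paragraphs as a prefix
lemma normAloop_prefix (xs : List String) : ∀ (ps cur : List String),
    normAloop xs ps cur = ps ++ normAloop xs [] cur := by
  induction xs with
  | nil => intro ps cur; simp only [normAloop]; split_ifs <;> simp
  | cons x rest ih =>
      intro ps cur
      simp only [normAloop]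
      split_ifs with h1 h2
      · exact ih ps cur
      · rw [ih (ps ++ [PySem.Str.join " " cur]) [],
            ih ([] ++ [PySem.Str.join " " cur]) []]
        simp
      · exact ih ps (cur ++ [PySem.Str.strip x])

-- B's loop emits the already-collected paragraphs as a prefix
lemma pvOuterB_prefix : ∀ (xs ps : List String), pvOuterB ps xs = ps ++ pvOuterB [] xs := by
  intro xs
  induction hn : xs.length using Nat.strong_induction_on generalizing xs with
  | _ n ih =>
  subst hn
  match xs with
  | [] => intro ps; simp [pvOuterB]
  | head :: rest =>
    intro ps
    by_cases h : PySem.Str.strip head = ""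
    · simp only [pvOuterB, h, ite_true]
      exact ih rest.length (by simp) rest rfl ps
    · simp only [pvOuterB, h, ite_false]
      have hl : (pvRunB [PySem.Str.strip head] rest).2.length < (head :: rest).length :=
        lt_of_le_of_lt (pvRunB_len rest [PySem.Str.strip head]) (by simp)
      rw [ih _ hl _ rfl (ps ++ [PySem.Str.join " " (pvRunB [PySem.Str.strip head] rest).1]),
          ih _ hl _ rfl ([] ++ [PySem.Str.join " " (pvRunB [PySem.Str.strip head] rest).1])]
      simp

-- what the inner while loop of B computes
lemma pvRunB_spec (rest : List String) : ∀ (run : List String),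
    pvRunB run rest =
      (run ++ (rest.takeWhile (fun y => PySem.Str.strip y ≠ "")).map PySem.Str.strip,
       rest.dropWhile (fun y => PySem.Str.strip y ≠ "")) := by
  induction rest with
  | nil => intro run; simp [pvRunB]
  | cons y ys ih =>
      intro run
      simp only [pvRunB, List.takeWhile, List.dropWhile]
      by_cases h : PySem.Str.strip y = "" <;> simp [h, ih]

-- A's loop absorbs a run of non-blank lines into `current`
lemma normAloop_run : ∀ (run : List String), (∀ y ∈ run, PySem.Str.strip y ≠ "") →
    ∀ (rest ps cur : List String),
    normAloop (run ++ rest) ps cur = normAloop rest ps (cur ++ run.map PySem.Str.strip) := by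
  intro run
  induction run with
  | nil => intro _ rest ps cur; simp
  | cons y ys ih =>
      intro h rest ps cur
      have hy : PySem.Str.strip y ≠ "" := h y (by simp)
      simp only [List.cons_append, normAloop, hy]
      rw [if_neg (by simp), ih (fun z hz => h z (by simp [hz])) rest ps (cur ++ [PySem.Str.strip y])]
      simp

-- the two loops agree from empty state
lemma main_loop_eq : ∀ (xs : List String), normAloop xs [] [] = pvOuterB [] xs := by
  intro xs
  induction hn : xs.length using Nat.strong_induction_on generalizing xs with
  | _ n ih =>
  subst hn
  match xs with
  | [] => simp [normAloop, pvOuterB]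
  | x :: rest =>
    by_cases hx : PySem.Str.strip x = ""
    · simp only [normAloop, pvOuterB, hx, ite_true]
      exact ih rest.length (by simp) rest rfl
    · simp only [normAloop, pvOuterB, hx, ite_false]
      rw [pvRunB_spec]
      set grp := rest.takeWhile (fun y => PySem.Str.strip y ≠ "") with hgrp
      set rest' := rest.dropWhile (fun y => PySem.Str.strip y ≠ "") with hrest'
      have hsplit : grp ++ rest' = rest := List.takeWhile_append_dropWhile
      have hgrpall : ∀ y ∈ grp, PySem.Str.strip y ≠ "" := by
        intro y hy
        have := List.mem_takeWhile_imp (hgrp ▸ hy)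
        simpa using this
      have hlen : rest'.length ≤ rest.length := by
        rw [hrest']; exact List.length_dropWhile_le _ _
      rw [show ([] : List String) ++ [PySem.Str.strip x] = [PySem.Str.strip x] by simp] at *
      rw [← hsplit, normAloop_run grp hgrpall rest' [] [PySem.Str.strip x]]
      dsimp only
      rw [pvOuterB_prefix rest' ([] ++ [PySem.Str.join " " ([PySem.Str.strip x] ++ grp.map PySem.Str.strip)])]
      match hr : rest' with
      | [] => simp [normAloop, pvOuterB]
      | y :: ys =>
        have hy : PySem.Str.strip y = "" := by
          have h0 := List.head?_dropWhile_not (fun y => decide (PySem.Str.strip y ≠ "")) rest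
          rw [← hrest'] at h0
          simpa using h0
        simp only [normAloop, hy, ite_true]
        rw [if_neg (by simp : ¬([PySem.Str.strip x] ++ grp.map PySem.Str.strip = []))]
        rw [normAloop_prefix]
        simp only [pvOuterB, hy, ite_true]
        have hys : ys.length < (x :: rest).length := by
          simp only [List.length_cons] at hlen ⊢
          omega
        rw [ih ys.length hys ys rfl]

-- ===== VERDICT (by name: the statement is the Claim_ definition above) =====
theorem normalize_block_lines_py_spec : Claim_equal_normalize_block_lines_py := by
  intro block_lines style _
  unfold Spec_normalize_block_lines_py normalize_block_lines_py normalize_block_lines_py_alt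
  rw [main_loop_eq]
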